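-- pv_equiv track=rewrite | github.com/wmatzko/astrostats | HW4_3.py | cz
-- ===== SOURCE A (Python) =====
-- def cz(x):
--     '''
--     Count number of zeros between nonzero elements
--     This returns the number of minutes between flares if the correct array is passed
--     '''
--     count = 0
--     c_arr = []
--     for i in range(len(x)):
--         el = x[i]
--         if el == 0:
--             count += 1
--         else:
--             if count>0:
--                 c_arr.append(count)
--             count = 0
--     return c_arr
-- ===== SOURCE B (Python) =====
-- def cz(x):
--     """Count number of zeros between nonzero elements (leading zeros included,
--     trailing zeros excluded)."""
--     c_arr = []
--     prev = -1
--     for i in [i for i, v in enumerate(x) if v != 0]: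
--         gap = i - prev - 1
--         if gap > 0:
--             c_arr.append(gap)
--         prev = i
--     return c_arr
-- ===== Notes on version B (the rewrite author's own statement) =====
-- stated objective: alternative
-- what changed: Instead of scanning every element with a running zero-counter, B first collects the indices of nonzero elements and then emits the positive gaps between consecutive nonzero indices (prev initialised to -1), which automatically includes the leading run and drops the trailing run.
import Mathlib
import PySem

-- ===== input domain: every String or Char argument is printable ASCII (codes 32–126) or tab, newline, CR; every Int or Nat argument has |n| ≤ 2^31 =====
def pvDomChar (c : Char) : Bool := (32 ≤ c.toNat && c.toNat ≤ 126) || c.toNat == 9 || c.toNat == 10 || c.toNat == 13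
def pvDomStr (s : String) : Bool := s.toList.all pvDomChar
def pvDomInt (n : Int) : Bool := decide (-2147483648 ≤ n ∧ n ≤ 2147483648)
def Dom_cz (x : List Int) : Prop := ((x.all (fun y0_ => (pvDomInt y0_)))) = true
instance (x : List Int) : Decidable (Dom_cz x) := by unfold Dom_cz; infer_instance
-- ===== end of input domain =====

-- B replaces A's running zero-counter scan by collecting the nonzero indices and
-- emitting the positive gaps between consecutive nonzero indices (objective: alternative).

-- ===== PORT A =====
-- A: scan x left to right with a running zero-counter; append the counter at each
-- nonzero element when it is positive. State = (count, c_arr).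
def cz (x : List Int) : List Int :=
  ((PySem.List.pyRange 0 (PySem.List.len x) 1).foldl
    (fun (s : Int × List Int) i =>
      let el := PySem.List.pyGetD x i 0   -- x[i]; i ∈ range(len(x)) is always in range
      if el = 0 then (s.1 + 1, s.2)
      else (0, if s.1 > 0 then s.2 ++ [s.1] else s.2))
    (0, [])).2

-- ===== PORT B =====
-- B: indices of nonzero elements, then gaps i - prev - 1 between consecutive ones.
def cz_alt (x : List Int) : List Int :=
  let idx := ((PySem.List.enumerate x 0).filter (fun p => p.2 != 0)).map (·.1)
  (idx.foldl
    (fun (s : Int × List Int) i =>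
      let gap := i - s.1 - 1
      (i, if gap > 0 then s.2 ++ [gap] else s.2))
    (-1, [])).2

-- ===== PRECONDITION & SPEC =====
def Spec_cz (x : List Int) (out : List Int) : Prop := out = cz_alt x
instance (x : List Int) (out : List Int) : Decidable (Spec_cz x out) := by unfold Spec_cz; infer_instance

-- ===== CLAIM (what is proved, stated in full; the proofs are below) =====
def Claim_equal_cz : Prop := ∀ (x : List Int), Dom_cz x → Spec_cz x (cz x)

-- ===== LEMMAS AND PROOFS =====

-- the common characterisation: zero-run lengths of x given c zeros already pending
def gB : List Int → Int → List Int
  | [], _ => []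
  | e :: t, c => if e = 0 then gB t (c + 1) else (if c > 0 then [c] else []) ++ gB t 0

theorem czA_fold (x : List Int) : ∀ (c : Int) (acc : List Int),
    (x.foldl
      (fun (s : Int × List Int) el =>
        if el = 0 then (s.1 + 1, s.2)
        else (0, if s.1 > 0 then s.2 ++ [s.1] else s.2))
      (c, acc)).2 = acc ++ gB x c := by
  induction x with
  | nil => simp [gB]
  | cons e t ih =>
    intro c acc
    by_cases he : e = 0
    · simp [he, gB, ih]
    · simp only [List.foldl_cons, gB, if_neg he]
      rw [ih]
      split_ifs <;> simp

theorem czB_fold (x : List Int) : ∀ (s prev : Int) (acc : List Int), prev ≤ s - 1 →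
    (((((PySem.List.enumerate x s).filter (fun p => p.2 != 0)).map (·.1)).foldl
      (fun (st : Int × List Int) i =>
        let gap := i - st.1 - 1
        (i, if gap > 0 then st.2 ++ [gap] else st.2))
      (prev, acc)).2 = acc ++ gB x (s - prev - 1)) := by
  induction x with
  | nil => simp [PySem.List.enumerate_nil, gB]
  | cons e t ih =>
    intro s prev acc hp
    rw [PySem.List.enumerate_cons]
    by_cases he : e = 0
    · have : (s - prev - 1) + 1 = (s + 1) - prev - 1 := by ring
      simp only [List.filter_cons, he, gB]
      simp only [show (((0 : Int) != 0)) = false from rfl, Bool.false_eq_true, if_false]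
      rw [ih (s + 1) prev acc (by omega), ← this]
      simp
    · simp only [List.filter_cons, show ((e != 0) = true) from by simpa using he, if_pos]
      simp only [List.map_cons, List.foldl_cons]
      rw [ih (s + 1) s _ (by omega)]
      simp only [gB, if_neg he]
      have h1 : s + 1 - s - 1 = 0 := by ring
      rw [h1]
      split_ifs with h <;> simp

theorem cz_eq_gB (x : List Int) : cz x = gB x 0 := by
  unfold cz
  rw [PySem.List.foldl_pyRange_zero_pyGetD x 0
    (fun (s : Int × List Int) el =>
      if el = 0 then (s.1 + 1, s.2)
      else (0, if s.1 > 0 then s.2 ++ [s.1] else s.2)) (0, [])]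
  simpa using czA_fold x 0 []

theorem cz_alt_eq_gB (x : List Int) : cz_alt x = gB x 0 := by
  unfold cz_alt
  simpa using czB_fold x 0 (-1) [] (by omega)

-- ===== VERDICT (by name: the statement is the Claim_ definition above) =====
theorem cz_spec : Claim_equal_cz := by
  intro x _
  unfold Spec_cz
  rw [cz_eq_gB, cz_alt_eq_gB]
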